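-- pv_equiv track=rewrite | github.com/mcenirm/serverless_service_discovery | test_using_aws4_testsuite.py | split_headers_and_body
-- ===== SOURCE A (Python) =====
-- def split_headers_and_body(lines):
--     headers = []
--     body = []
--     in_headers = True
--     for line in lines:
--         if in_headers:
--             if line == '':
--                 in_headers = False
--                 continue
--             headers.append(line)
--         else:
--             body.append(line)
--     return '\n'.join(headers), '\n'.join(body)
-- ===== SOURCE B (Python) =====
-- def split_headers_and_body(lines):
--     try:
--         i = lines.index('')
--     except ValueError:
--         return '\n'.join(lines), ''
--     return '\n'.join(lines[:i]), '\n'.join(lines[i+1:])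
-- ===== Notes on version B (the rewrite author's own statement) =====
-- stated objective: simpler
-- what changed: Replaces the stateful flag-driven scan with a find-then-slice decomposition: locate the first blank line with list.index and join the two slices around it.
import Mathlib
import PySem

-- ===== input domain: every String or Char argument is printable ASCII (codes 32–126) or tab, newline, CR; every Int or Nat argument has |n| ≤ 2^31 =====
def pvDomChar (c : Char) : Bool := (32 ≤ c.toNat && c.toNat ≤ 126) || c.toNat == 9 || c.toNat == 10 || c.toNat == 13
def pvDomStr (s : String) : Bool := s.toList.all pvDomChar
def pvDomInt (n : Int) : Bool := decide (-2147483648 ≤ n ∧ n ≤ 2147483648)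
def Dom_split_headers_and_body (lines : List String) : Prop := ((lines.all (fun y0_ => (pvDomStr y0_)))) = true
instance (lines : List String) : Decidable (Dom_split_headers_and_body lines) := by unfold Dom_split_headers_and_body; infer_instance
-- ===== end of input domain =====

-- B replaces A's stateful flag-driven scan with a find-then-slice decomposition (simpler); same return value.

-- ===== PORT A =====
-- one step of A's for-loop over state (headers, body, in_headers)
def shbStep (st : List String × List String × Bool) (line : String) :
    List String × List String × Bool :=
  if st.2.2 then
    if line = "" then (st.1, st.2.1, false)
    else (st.1 ++ [line], st.2.1, true)
  else (st.1, st.2.1 ++ [line], st.2.2)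

def split_headers_and_body (lines : List String) : String × String :=
  let st := lines.foldl shbStep ([], [], true)
  (PySem.Str.join "\n" st.1, PySem.Str.join "\n" st.2.1)

-- ===== PORT B =====
def split_headers_and_body_alt (lines : List String) : String × String :=
  match PySem.List.index? lines "" with
  | none => (PySem.Str.join "\n" lines, "")
  | some i =>
      (PySem.Str.join "\n" (PySem.List.slice lines none (some (i : Int))),
       PySem.Str.join "\n" (PySem.List.slice lines (some ((i : Int) + 1)) none))

-- ===== PRECONDITION & SPEC =====
def Spec_split_headers_and_body (lines : List String) (out : String × String) : Prop := out = split_headers_and_body_alt lines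
instance (lines : List String) (out : String × String) : Decidable (Spec_split_headers_and_body lines out) := by unfold Spec_split_headers_and_body; infer_instance

-- ===== CLAIM (what is proved, stated in full; the proofs are below) =====
def Claim_equal_split_headers_and_body : Prop := ∀ (lines : List String), Dom_split_headers_and_body lines → Spec_split_headers_and_body lines (split_headers_and_body lines)

-- ===== LEMMAS AND PROOFS =====

-- after the blank line, A only appends to body
theorem shb_foldl_false (lines : List String) (h b : List String) :
    lines.foldl shbStep (h, b, false) = (h, b ++ lines, false) := by
  induction lines generalizing b with
  | nil => simp
  | cons x xs ih => simp [shbStep, ih]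

-- A's scan, characterized by the position of the first blank line
theorem shb_foldl_true (lines : List String) (h : List String) :
    lines.foldl shbStep (h, [], true) =
      match PySem.List.index? lines "" with
      | none => (h ++ lines, [], true)
      | some i => (h ++ lines.take i, lines.drop (i + 1), false) := by
  induction lines generalizing h with
  | nil => simp [PySem.List.index?]
  | cons x xs ih =>
    by_cases hx : x = ""
    · subst hx
      rw [PySem.List.index?_cons_self]
      simp [shbStep, shb_foldl_false]
    · rw [PySem.List.index?_cons_of_ne xs hx]
      simp only [List.foldl_cons, shbStep, if_neg hx, if_true]
      rw [ih (h ++ [x])]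
      cases hix : PySem.List.index? xs "" with
      | none => simp
      | some i => simp [List.take_succ_cons]

-- ===== VERDICT (by name: the statement is the Claim_ definition above) =====
theorem split_headers_and_body_spec : Claim_equal_split_headers_and_body := by
  intro lines _
  show _ = _
  unfold split_headers_and_body split_headers_and_body_alt
  rw [shb_foldl_true lines []]
  cases hix : PySem.List.index? lines "" with
  | none => simp [PySem.Str.join]
  | some i =>
    simp only [List.nil_append]
    rw [PySem.List.slice_to_natCast]
    have : ((i : Int) + 1) = ((i + 1 : Nat) : Int) := by push_cast; ring
    rw [this, PySem.List.slice_from_natCast]
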